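-- pv_equiv track=rewrite | github.com/gurion/Scalez | backend/flask_server/processScales.py | interval_length_array
-- ===== SOURCE A (Python) =====
-- def interval_length_array(arr):
--     interval_arr = []
--     current_number = 0
--     for i in range(len(arr) - 1):
--         current_number += 1
--         if arr[i] != arr[i + 1]:
--             interval_arr += [current_number]
--             current_number = 0
--     return interval_arr
-- ===== SOURCE B (Python) =====
-- def interval_length_array(arr):
--     bs = [i for i in range(len(arr) - 1) if arr[i] != arr[i + 1]]
--     return [b - p for p, b in zip([-1] + bs, bs)]
-- ===== Notes on version B (the rewrite author's own statement) =====
-- stated objective: alternative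
-- what changed: Replaces the single scan with a running counter by a two-stage pipeline: first build the table of boundary indices where adjacent elements differ, then emit the consecutive differences of (-1, *boundaries).
import Mathlib
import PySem

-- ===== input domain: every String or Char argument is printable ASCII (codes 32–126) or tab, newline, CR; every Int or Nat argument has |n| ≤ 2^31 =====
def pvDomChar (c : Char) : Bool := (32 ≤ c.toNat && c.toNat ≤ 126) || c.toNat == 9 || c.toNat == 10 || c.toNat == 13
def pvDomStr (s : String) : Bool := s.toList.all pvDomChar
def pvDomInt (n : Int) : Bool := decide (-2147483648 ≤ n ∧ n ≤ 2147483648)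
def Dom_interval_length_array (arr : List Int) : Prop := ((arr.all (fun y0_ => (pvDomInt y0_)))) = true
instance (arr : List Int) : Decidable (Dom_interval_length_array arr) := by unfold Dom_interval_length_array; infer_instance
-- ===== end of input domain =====

-- B replaces A's running-counter scan by a two-stage pipeline (boundary-index table, then consecutive differences); alternative decomposition, same cost.


-- ===== PORT A =====
-- Literal port of A: fold over range(len(arr)-1) carrying (interval_arr, current_number).
def interval_length_array (arr : List Int) : List Int :=
  (PySem.List.pyRange 0 ((arr.length : Int) - 1) 1).foldl
    (fun (st : List Int × Int) i =>
      let cur := st.2 + 1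
      if PySem.List.pyGetD arr i 0 != PySem.List.pyGetD arr (i + 1) 0 then
        (st.1 ++ [cur], 0)
      else
        (st.1, cur))
    ([], 0) |>.1

-- ===== PORT B =====
-- Literal port of B: boundary-index table, then consecutive differences of (-1, *bs).
def interval_length_array_alt (arr : List Int) : List Int :=
  let bs := (PySem.List.pyRange 0 ((arr.length : Int) - 1) 1).filter
    (fun i => PySem.List.pyGetD arr i 0 != PySem.List.pyGetD arr (i + 1) 0)
  (List.zip ((-1) :: bs) bs).map (fun q => q.2 - q.1)

-- ===== PRECONDITION & SPEC =====
def Spec_interval_length_array (arr : List Int) (out : List Int) : Prop := out = interval_length_array_alt arr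
instance (arr : List Int) (out : List Int) : Decidable (Spec_interval_length_array arr out) := by unfold Spec_interval_length_array; infer_instance

-- ===== CLAIM (what is proved, stated in full; the proofs are below) =====
def Claim_equal_interval_length_array : Prop := ∀ (arr : List Int), Dom_interval_length_array arr → Spec_interval_length_array arr (interval_length_array arr)

-- ===== LEMMAS AND PROOFS =====

-- Loop invariant: A's fold over a consecutive index range, started with counter c = a - p - 1
-- (p = previous boundary, initially -1), appends exactly the consecutive differences of
-- (p, *boundaries in the range).
theorem ila_loop_inv (P : Int → Bool) : ∀ (n : Nat) (a b p c : Int) (acc : List Int),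
    (b - a).toNat = n → c = a - p - 1 →
    ((PySem.List.pyRange a b 1).foldl
      (fun (st : List Int × Int) i =>
        if P i then (st.1 ++ [st.2 + 1], 0) else (st.1, st.2 + 1))
      (acc, c)).1
    = acc ++ (List.zip (p :: (PySem.List.pyRange a b 1).filter P)
                       ((PySem.List.pyRange a b 1).filter P)).map (fun q => q.2 - q.1) := by
  intro n
  induction n with
  | zero =>
    intro a b p c acc h hc
    rw [PySem.List.pyRange_one_eq_nil (by omega)]
    simp
  | succ m ih =>
    intro a b p c acc h hc
    rw [PySem.List.pyRange_one_cons (by omega)]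
    by_cases hP : P a = true
    · simp only [List.foldl_cons, List.filter_cons, hP, if_pos]
      rw [ih (a + 1) b a 0 (acc ++ [c + 1]) (by omega) (by omega)]
      have hcp : c + 1 = a - p := by omega
      simp [hcp]
    · simp only [List.foldl_cons, List.filter_cons, hP, Bool.false_eq_true, if_false]
      exact ih (a + 1) b p (c + 1) acc (by omega) (by omega)

-- ===== VERDICT (by name: the statement is the Claim_ definition above) =====
theorem interval_length_array_spec : Claim_equal_interval_length_array := by
  intro arr _
  show interval_length_array arr = interval_length_array_alt arr
  have key := ila_loop_inv
    (fun i => PySem.List.pyGetD arr i 0 != PySem.List.pyGetD arr (i + 1) 0)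
    (((arr.length : Int) - 1) - 0).toNat 0 ((arr.length : Int) - 1) (-1) 0 []
    rfl (by norm_num)
  calc interval_length_array arr
      = ((PySem.List.pyRange 0 ((arr.length : Int) - 1) 1).foldl
          (fun (st : List Int × Int) i =>
            if PySem.List.pyGetD arr i 0 != PySem.List.pyGetD arr (i + 1) 0 then
              (st.1 ++ [st.2 + 1], 0)
            else (st.1, st.2 + 1))
          ([], 0)).1 := rfl
    _ = _ := by rw [key]; simp [interval_length_array_alt]
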